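-- pv_equiv track=rewrite | github.com/zandermoss/AmpliTools | src/PermutationTools.py | PartialSymmetricPerms
-- ===== SOURCE A (Python) =====
-- from itertools import permutations, combinations, product
--
-- def PartialSymmetricPerms(nlegs,permlegs):
--     partial_perms = list(permutations(permlegs))
--     perms = []
--     for pperm in partial_perms:
--         perm = list(range(1,nlegs+1))
--         for i,p in zip(permlegs,pperm):
--             perm[i-1] = p
--         perms.append(tuple(perm))
--     return perms
-- ===== SOURCE B (Python) =====
-- def PartialSymmetricPerms(nlegs, permlegs):
--     # Recursive backtracking: walk the slots in permlegs order, at each slot try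
--     # every still-unused value (by position), writing it into the working tuple
--     # as we descend.  Generation and placement are fused; no itertools.
--     def rec(slots, vals, cur):
--         if not slots:
--             return [tuple(cur)]
--         s = slots[0]
--         out = []
--         for k in range(len(vals)):
--             nxt = list(cur)
--             nxt[s - 1] = vals[k]
--             out.extend(rec(slots[1:], vals[:k] + vals[k + 1:], nxt))
--         return out
--
--     return rec(list(permlegs), list(permlegs), list(range(1, nlegs + 1)))
-- ===== Notes on version B (the rewrite author's own statement) =====
-- stated objective: alternative
-- what changed: A materialises itertools.permutations(permlegs) and, for each permutation, prefills an identity list and overlays the k slots; B never enumerates permutations: it generates the results directly by recursive backtracking over the slots, choosing each still-unused value and writing it into the working tuple as it descends, so generation and placement are fused into one recursion.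
import Mathlib
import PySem

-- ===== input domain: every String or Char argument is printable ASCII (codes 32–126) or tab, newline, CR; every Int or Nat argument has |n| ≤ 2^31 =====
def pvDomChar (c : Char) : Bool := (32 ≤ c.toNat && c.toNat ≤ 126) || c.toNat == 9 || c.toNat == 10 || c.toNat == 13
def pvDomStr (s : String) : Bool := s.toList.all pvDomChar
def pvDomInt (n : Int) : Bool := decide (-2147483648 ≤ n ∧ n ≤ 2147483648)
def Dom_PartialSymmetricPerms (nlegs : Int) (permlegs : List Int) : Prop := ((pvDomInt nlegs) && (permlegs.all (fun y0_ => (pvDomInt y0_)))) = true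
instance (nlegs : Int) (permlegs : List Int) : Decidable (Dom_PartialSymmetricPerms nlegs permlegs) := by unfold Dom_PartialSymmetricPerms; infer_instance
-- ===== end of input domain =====

-- B drops itertools.permutations entirely: it generates the output tuples by recursive
-- backtracking over the slots, fusing permutation generation with placement (objective: alternative).

-- ===== PORT A =====
-- perms = []; for pperm in permutations(permlegs): perm = list(range(1, nlegs+1));
--   for i, p in zip(permlegs, pperm): perm[i-1] = p;  perms.append(tuple(perm))
-- perm[i-1] = p is PySem.List.pySetD (total; Python's IndexError cases are excluded by Pre_)
def PartialSymmetricPerms (nlegs : Int) (permlegs : List Int) : List (List Int) :=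
  (PySem.List.permutations permlegs permlegs.length).foldl
    (fun perms pperm =>
      perms ++ [(permlegs.zip pperm).foldl
        (fun perm ip => PySem.List.pySetD perm (ip.1 - 1) ip.2)
        (PySem.List.pyRange 1 (nlegs + 1) 1)])
    []

-- ===== PORT B =====
-- def rec(slots, vals, cur):
--   if not slots: return [tuple(cur)]
--   s = slots[0]; out = []
--   for k in range(len(vals)):
--     nxt = list(cur); nxt[s-1] = vals[k]
--     out.extend(rec(slots[1:], vals[:k] + vals[k+1:], nxt))
--   return out
-- nxt[s-1] = vals[k] is PySem.List.pySetD (total; IndexError cases excluded by Pre_);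
-- vals[k] with 0 ≤ k < len(vals) is vals.getD k 0 (exact in range);
-- vals[:k] + vals[k+1:] is vals.eraseIdx k (exact: k is in range)
def pvRecB (slots : List Int) (vals : List Int) (cur : List Int) : List (List Int) :=
  match slots with
  | [] => [cur]
  | s :: rest =>
    (List.range vals.length).foldl
      (fun out k =>
        out ++ pvRecB rest (vals.eraseIdx k) (PySem.List.pySetD cur (s - 1) (vals.getD k 0)))
      []

-- return rec(list(permlegs), list(permlegs), list(range(1, nlegs+1)))
def PartialSymmetricPerms_alt (nlegs : Int) (permlegs : List Int) : List (List Int) :=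
  pvRecB permlegs permlegs (PySem.List.pyRange 1 (nlegs + 1) 1)

-- ===== PRECONDITION & SPEC =====
-- exactly the inputs where A (and B) return: every leg reference i must be a valid
-- Python index i-1 into the nlegs-long identity list, else both raise IndexError
def Pre_PartialSymmetricPerms (nlegs : Int) (permlegs : List Int) : Prop :=
  (permlegs.all (fun i => decide (1 - nlegs ≤ i) && decide (i ≤ nlegs))) = true
instance (nlegs : Int) (permlegs : List Int) : Decidable (Pre_PartialSymmetricPerms nlegs permlegs) := by unfold Pre_PartialSymmetricPerms; infer_instance
def pvWitness_PartialSymmetricPerms : Int × List Int := (4, [1, 3, 4])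
def Spec_PartialSymmetricPerms (nlegs : Int) (permlegs : List Int) (out : List (List Int)) : Prop := out = PartialSymmetricPerms_alt nlegs permlegs
instance (nlegs : Int) (permlegs : List Int) (out : List (List Int)) : Decidable (Spec_PartialSymmetricPerms nlegs permlegs out) := by unfold Spec_PartialSymmetricPerms; infer_instance

-- ===== CLAIM =====
def Claim_equal_PartialSymmetricPerms : Prop := ∀ (nlegs : Int) (permlegs : List Int), Dom_PartialSymmetricPerms nlegs permlegs → Pre_PartialSymmetricPerms nlegs permlegs → Spec_PartialSymmetricPerms nlegs permlegs (PartialSymmetricPerms nlegs permlegs)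

-- ===== LEMMAS AND PROOFS =====

-- B's backtracking recursion computes exactly "overlay each generated permutation onto cur":
-- induction on the slot list, with vals running over the same length
lemma pvRecB_eq_map (slots : List Int) :
    ∀ (vals cur : List Int), vals.length = slots.length →
      pvRecB slots vals cur
        = (PySem.List.permutations vals vals.length).map
            (fun pperm => (slots.zip pperm).foldl
              (fun perm ip => PySem.List.pySetD perm (ip.1 - 1) ip.2) cur) := by
  induction slots with
  | nil =>
    intro vals cur hlen
    have : vals = [] := List.length_eq_zero_iff.mp hlen
    subst this
    simp [pvRecB]
  | cons s rest ih =>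
    intro vals cur hlen
    rw [pvRecB, PySem.List.foldl_append_eq_flatMap, List.nil_append]
    conv_rhs => rw [hlen, List.length_cons, PySem.List.permutations]
    rw [List.map_flatMap]
    apply List.flatMap_congr
    intro k hk
    have hklt : k < vals.length := List.mem_range.mp hk
    have hget : vals[k]? = some (vals.getD k 0) := by
      rw [List.getElem?_eq_getElem hklt, List.getD_eq_getElem _ _ hklt]
    simp only [hget]
    have hlen' : (vals.eraseIdx k).length = rest.length := by
      rw [List.length_eraseIdx_of_lt hklt]
      have := hlen; simp at this; omega
    rw [ih (vals.eraseIdx k) _ hlen', hlen', List.map_map]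
    apply List.map_congr_left
    intro p _
    simp [List.zip_cons_cons, List.foldl_cons]

-- ===== VERDICT =====
theorem PartialSymmetricPerms_spec : Claim_equal_PartialSymmetricPerms := by
  intro nlegs permlegs _ _
  unfold Spec_PartialSymmetricPerms PartialSymmetricPerms PartialSymmetricPerms_alt
  rw [PySem.List.foldl_append_singleton_eq_map, List.nil_append,
    pvRecB_eq_map permlegs permlegs _ rfl]
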